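-- pv_equiv track=rewrite | github.com/nbatho/Python_PE | PYKT12022 - Phep toan or.py | all_or
-- ===== SOURCE A (Python) =====
-- def all_or(a):
--     res = set()
--     curr = set()
--     for num in a:
--         next_set = {num}
--         for val in curr:
--             next_set.add(val|num)
--         curr = next_set
--         res.update(curr)
--     return res
-- ===== SOURCE B (Python) =====
-- def all_or(a):
--     res = set()
--     seen = []  # elements before the current one, most recent first
--     for num in a:
--         o = num
--         res.add(o)
--         for x in seen:
--             o |= x
--             res.add(o)
--         seen = [num] + seen
--     return res
-- ===== Notes on version B (the rewrite author's own statement) =====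
-- stated objective: alternative
-- what changed: B drops A's rolling set of OR-values of subarrays ending at each index and instead directly recomputes each subarray OR by extending an accumulator leftwards over the previously seen elements, adding every intermediate OR to the result set.
import Mathlib
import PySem

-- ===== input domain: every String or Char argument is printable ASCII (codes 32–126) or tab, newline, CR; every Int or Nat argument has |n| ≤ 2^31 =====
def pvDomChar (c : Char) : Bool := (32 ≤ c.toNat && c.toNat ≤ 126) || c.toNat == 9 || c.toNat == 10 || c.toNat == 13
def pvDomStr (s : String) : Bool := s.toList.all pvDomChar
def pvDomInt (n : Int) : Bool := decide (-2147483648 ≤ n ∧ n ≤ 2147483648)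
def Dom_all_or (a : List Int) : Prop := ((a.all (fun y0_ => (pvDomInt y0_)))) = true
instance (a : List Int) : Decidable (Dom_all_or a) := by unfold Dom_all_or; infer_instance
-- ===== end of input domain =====

-- B replaces A's rolling set of subarray-OR values by a direct nested enumeration that
-- recomputes each subarray OR leftwards from its end index (objective: alternative, not faster).
-- Both Pythons return a set; the ports return its elements in first-insertion order.

-- ===== PORT A =====
def all_or (a : List Int) : List Int :=
  (a.foldl (fun (st : PySem.Set Int × PySem.Set Int) num =>
      let next := st.2.foldl (fun s v => PySem.Set.add s (PySem.Int.bor v num))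
        (PySem.Set.ofList [num])
      (PySem.Set.update st.1 next, next)) (PySem.Set.empty, PySem.Set.empty)).1

-- ===== PORT B =====
def all_or_alt (a : List Int) : List Int :=
  (a.foldl (fun (st : PySem.Set Int × List Int) num =>
      let inner := st.2.foldl (fun (p : PySem.Set Int × Int) x =>
          let o := PySem.Int.bor p.2 x
          (PySem.Set.add p.1 o, o)) (PySem.Set.add st.1 num, num)
      (inner.1, num :: st.2)) (PySem.Set.empty, [])).1

-- ===== PRECONDITION & SPEC =====
def Spec_all_or (a : List Int) (out : List Int) : Prop := out = all_or_alt a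
instance (a : List Int) (out : List Int) : Decidable (Spec_all_or a out) := by unfold Spec_all_or; infer_instance

-- ===== CLAIM (what is proved, stated in full; the proofs are below) =====
def Claim_equal_all_or : Prop := ∀ (a : List Int), Dom_all_or a → Spec_all_or a (all_or a)

-- ===== LEMMAS AND PROOFS =====

-- Nat bit arithmetic: ldiff x y + (x &&& y) = x, hence x - (x &&& y) = ldiff x y.
theorem pv_ldiff_add_land : ∀ (x y : Nat), Nat.ldiff x y + (x &&& y) = x := by
  intro x
  induction x using Nat.binaryRec with
  | zero => intro y; simp [Nat.ldiff]
  | bit b n ih =>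
    intro y
    induction y using Nat.bitCasesOn with
    | bit b' y' =>
      rw [Nat.ldiff_bit, Nat.land_bit, Nat.bit_val, Nat.bit_val, Nat.bit_val]
      have := ih y'
      cases b <;> cases b' <;> simp at * <;> omega

theorem pv_sub_land (x y : Nat) : x - (x &&& y) = Nat.ldiff x y := by
  have := pv_ldiff_add_land x y
  omega

-- PySem.Int.bor on the two Int constructors
theorem pv_bor_ofNat (m n : Nat) :
    PySem.Int.bor (Int.ofNat m) (Int.ofNat n) = Int.ofNat (m ||| n) := by
  simp [PySem.Int.bor]

theorem pv_bor_ofNat_negSucc (m n : Nat) :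
    PySem.Int.bor (Int.ofNat m) (Int.negSucc n) = Int.negSucc (Nat.ldiff n m) := by
  simp [PySem.Int.bor, Int.negSucc_eq, pv_sub_land]
  ring_nf
  omega

theorem pv_bor_negSucc_ofNat (m n : Nat) :
    PySem.Int.bor (Int.negSucc m) (Int.ofNat n) = Int.negSucc (Nat.ldiff m n) := by
  simp [PySem.Int.bor, Int.negSucc_eq, pv_sub_land]
  ring_nf
  omega

theorem pv_bor_negSucc (m n : Nat) :
    PySem.Int.bor (Int.negSucc m) (Int.negSucc n) = Int.negSucc (m &&& n) := by
  simp [PySem.Int.bor, Int.negSucc_eq]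
  ring_nf
  omega

theorem pv_bor_assoc (a b c : Int) :
    PySem.Int.bor (PySem.Int.bor a b) c = PySem.Int.bor a (PySem.Int.bor b c) := by
  cases a <;> cases b <;> cases c <;>
    simp only [pv_bor_ofNat, pv_bor_ofNat_negSucc, pv_bor_negSucc_ofNat, pv_bor_negSucc] <;>
    congr 1 <;>
    apply Nat.eq_of_testBit_eq <;> intro i <;>
    simp only [Nat.testBit_lor, Nat.testBit_land, Nat.testBit_ldiff] <;>
    rename_i x y z <;>
    cases x.testBit i <;> cases y.testBit i <;> cases z.testBit i <;> rfl

-- OR-scan of subarrays extending leftwards, and the value lists both loops insert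
def pvScanOr (o : Int) : List Int → List Int
  | [] => [o]
  | x :: xs => o :: pvScanOr (PySem.Int.bor o x) xs

def pvCurrVals : List Int → List Int
  | [] => []
  | x :: xs => pvScanOr x xs

def pvAllVals : List Int → List Int → List Int
  | _, [] => []
  | rev, num :: rest => pvScanOr num rev ++ pvAllVals (num :: rev) rest

theorem pvScanOr_map (xs : List Int) : ∀ o num,
    pvScanOr (PySem.Int.bor num o) xs = (pvScanOr o xs).map (fun v => PySem.Int.bor v num) := by
  induction xs with
  | nil => intro o num; simp [pvScanOr, PySem.Int.bor_comm]
  | cons x xs ih =>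
    intro o num
    simp only [pvScanOr, List.map_cons]
    rw [pv_bor_assoc, ih, PySem.Int.bor_comm num o]

theorem pv_update_singleton (t : PySem.Set Int) (y : Int) :
    PySem.Set.update t [y] = PySem.Set.add t y := by
  simp [PySem.Set.update_cons, PySem.Set.update_nil]

theorem pv_update_map_ofList (l : List Int) (s : PySem.Set Int) (f : Int → Int) :
    PySem.Set.update s ((PySem.Set.ofList l).map f) = PySem.Set.update s (l.map f) := by
  induction l using List.reverseRecOn with
  | nil => rfl
  | append_singleton xs x ih =>
    by_cases hx : x ∈ PySem.Set.ofList xs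
    · rw [PySem.Set.ofList_append_singleton, PySem.Set.add_of_mem hx, ih, List.map_append,
        PySem.Set.update_append]
      simp only [List.map_cons, List.map_nil]
      have hx' : x ∈ xs := by simpa [PySem.Set.mem_ofList] using hx
      rw [pv_update_singleton, PySem.Set.add_of_mem]
      rw [PySem.Set.mem_update]
      exact Or.inr (List.mem_map_of_mem hx')
    · rw [PySem.Set.ofList_append_singleton, PySem.Set.add_of_not_mem hx, List.map_append,
        List.map_append, PySem.Set.update_append, PySem.Set.update_append, ih]

theorem pv_update_ofList (l : List Int) (s : PySem.Set Int) :
    PySem.Set.update s (PySem.Set.ofList l) = PySem.Set.update s l := by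
  have h := pv_update_map_ofList l s id
  simpa using h

theorem pv_innerB (seen : List Int) : ∀ (res : PySem.Set Int) (o : Int),
    (seen.foldl (fun (p : PySem.Set Int × Int) x =>
        let o := PySem.Int.bor p.2 x
        (PySem.Set.add p.1 o, o)) (PySem.Set.add res o, o)).1
      = PySem.Set.update res (pvScanOr o seen) := by
  induction seen with
  | nil => intro res o; simp [pvScanOr]
  | cons x xs ih =>
    intro res o
    simp only [List.foldl_cons]
    rw [ih, pvScanOr, PySem.Set.update_cons]

theorem pv_next_vals (rev : List Int) (num : Int) :
    num :: (pvCurrVals rev).map (fun v => PySem.Int.bor v num) = pvScanOr num rev := by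
  cases rev with
  | nil => simp [pvCurrVals, pvScanOr]
  | cons x xs => simp [pvCurrVals, pvScanOr, pvScanOr_map]

theorem pv_B_inv (rest : List Int) : ∀ (res : PySem.Set Int) (rev : List Int),
    ((rest.foldl (fun (st : PySem.Set Int × List Int) num =>
      let inner := st.2.foldl (fun (p : PySem.Set Int × Int) x =>
          let o := PySem.Int.bor p.2 x
          (PySem.Set.add p.1 o, o)) (PySem.Set.add st.1 num, num)
      (inner.1, num :: st.2)) (res, rev)).1) = PySem.Set.update res (pvAllVals rev rest) := by
  induction rest with
  | nil => intro res rev; simp [pvAllVals, PySem.Set.update_nil]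
  | cons num rest ih =>
    intro res rev
    simp only [List.foldl_cons]
    rw [ih, pv_innerB, pvAllVals, PySem.Set.update_append]

theorem pv_A_inv (rest : List Int) : ∀ (res : PySem.Set Int) (rev : List Int),
    ((rest.foldl (fun (st : PySem.Set Int × PySem.Set Int) num =>
      let next := st.2.foldl (fun s v => PySem.Set.add s (PySem.Int.bor v num))
        (PySem.Set.ofList [num])
      (PySem.Set.update st.1 next, next)) (res, PySem.Set.ofList (pvCurrVals rev))).1)
    = PySem.Set.update res (pvAllVals rev rest) := by
  induction rest with
  | nil => intro res rev; simp [pvAllVals, PySem.Set.update_nil]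
  | cons num rest ih =>
    intro res rev
    simp only [List.foldl_cons]
    have hnext : (PySem.Set.ofList (pvCurrVals rev)).foldl
        (fun s v => PySem.Set.add s (PySem.Int.bor v num)) (PySem.Set.ofList [num])
        = PySem.Set.ofList (pvCurrVals (num :: rev)) := by
      rw [← PySem.Set.update_map_eq_foldl_add, pv_update_map_ofList,
        ← PySem.Set.ofList_append]
      simp only [List.singleton_append]
      rw [show pvCurrVals (num :: rev) = pvScanOr num rev from rfl, pv_next_vals]
    rw [hnext, ih]
    rw [show pvCurrVals (num :: rev) = pvScanOr num rev from rfl]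
    rw [pv_update_ofList, pvAllVals, PySem.Set.update_append]

-- ===== VERDICT (by name: the statement is the Claim_ definition above) =====
theorem all_or_spec : Claim_equal_all_or := by
  intro a _
  unfold Spec_all_or all_or all_or_alt
  exact (pv_A_inv a PySem.Set.empty []).trans (pv_B_inv a PySem.Set.empty []).symm
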